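-- pv_equiv track=rewrite | github.com/Krigeris/High-Stakes | High Stakes.py | pick_cards_for_ranks
-- ===== SOURCE A (Python) =====
-- def pick_cards_for_ranks(cards, ranks_needed, flush_suit=None):
--     picked = []
--     remaining = list(cards)
--     for r in ranks_needed:
--         for c in remaining:
--             if c[0] == r and (flush_suit is None or c[1] == flush_suit):
--                 picked.append(c)
--                 remaining.remove(c)
--                 break
--     return picked
-- ===== SOURCE B (Python) =====
-- def pick_cards_for_ranks(cards, ranks_needed, flush_suit=None):
--     groups = {}
--     for card in cards:
--         if flush_suit is None or card[1] == flush_suit: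
--             groups.setdefault(card[0], []).append(card)
--     picked = []
--     for r in ranks_needed:
--         g = groups.get(r)
--         if g:
--             picked.append(g.pop(0))
--     return picked
-- ===== Notes on version B (the rewrite author's own statement) =====
-- stated objective: faster
-- what changed: Replaces the per-rank linear scan of the remaining cards (with list.remove) by a single grouping pass building a rank-indexed dict of suit-filtered cards, then pops the front of each needed rank's queue.
import Mathlib
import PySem

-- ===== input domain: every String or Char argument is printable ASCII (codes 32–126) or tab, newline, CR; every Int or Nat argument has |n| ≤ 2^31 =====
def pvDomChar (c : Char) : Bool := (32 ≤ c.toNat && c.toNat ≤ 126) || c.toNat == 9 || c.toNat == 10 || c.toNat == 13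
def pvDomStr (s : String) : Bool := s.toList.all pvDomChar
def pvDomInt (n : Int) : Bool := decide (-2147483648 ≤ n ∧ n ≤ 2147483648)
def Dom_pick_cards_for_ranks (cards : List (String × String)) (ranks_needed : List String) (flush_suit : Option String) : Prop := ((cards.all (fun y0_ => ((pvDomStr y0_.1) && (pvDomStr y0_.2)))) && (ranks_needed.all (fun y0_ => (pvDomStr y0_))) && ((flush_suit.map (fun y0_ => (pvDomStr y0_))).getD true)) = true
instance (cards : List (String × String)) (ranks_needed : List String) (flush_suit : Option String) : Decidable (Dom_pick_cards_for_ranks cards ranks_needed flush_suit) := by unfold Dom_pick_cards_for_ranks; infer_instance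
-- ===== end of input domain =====

-- B replaces A's per-rank scan of the remaining cards by a single grouping pass
-- (rank -> queue of suit-filtered cards) followed by front-pops; objective: faster.


-- ===== PORT A =====
-- inner 'for c in remaining: if … : break' — returns the first matching card (if any)
def pvFindMatch (remaining : List (String × String)) (r : String) (flush_suit : Option String) : Option (String × String) :=
  match remaining with
  | [] => none
  | c :: t =>
    if c.1 = r ∧ (flush_suit = none ∨ some c.2 = flush_suit) then some c
    else pvFindMatch t r flush_suit

-- list.remove(c): drop the FIRST element equal to c (A only calls it on a member,
-- so Python's ValueError branch is unreachable; on [] we return [])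
def pvRemoveFirst (xs : List (String × String)) (c : String × String) : List (String × String) :=
  match xs with
  | [] => []
  | x :: t => if x = c then t else x :: pvRemoveFirst t c

-- outer 'for r in ranks_needed' with state (picked, remaining)
def pvPickLoop (ranks : List String) (picked remaining : List (String × String)) (flush_suit : Option String) : List (String × String) :=
  match ranks with
  | [] => picked
  | r :: rs =>
    match pvFindMatch remaining r flush_suit with
    | none => pvPickLoop rs picked remaining flush_suit
    | some c => pvPickLoop rs (picked ++ [c]) (pvRemoveFirst remaining c) flush_suit

def pick_cards_for_ranks (cards : List (String × String)) (ranks_needed : List String) (flush_suit : Option String) : List (String × String) :=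
  pvPickLoop ranks_needed [] cards flush_suit

-- ===== PORT B =====
-- 'flush_suit is None or card[1] == flush_suit'
def pvSuitOk (flush_suit : Option String) (c : String × String) : Bool :=
  match flush_suit with
  | none => true
  | some s => c.2 == s

-- grouping pass: groups.setdefault(card[0], []).append(card)
def pvBuildGroups (cards : List (String × String)) (flush_suit : Option String) : PySem.Dict String (List (String × String)) :=
  cards.foldl
    (fun d c => if pvSuitOk flush_suit c then d.modify c.1 [] (· ++ [c]) else d)
    PySem.Dict.empty

-- second loop: pop the front of each needed rank's queue
def pvPickFromGroups (ranks : List String) (groups : PySem.Dict String (List (String × String))) (picked : List (String × String)) : List (String × String) :=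
  match ranks with
  | [] => picked
  | r :: rs =>
    match groups.get? r with
    | some (c :: t) => pvPickFromGroups rs (groups.insert r t) (picked ++ [c])
    | _ => pvPickFromGroups rs groups picked

def pick_cards_for_ranks_alt (cards : List (String × String)) (ranks_needed : List String) (flush_suit : Option String) : List (String × String) :=
  pvPickFromGroups ranks_needed (pvBuildGroups cards flush_suit) []

-- ===== PRECONDITION & SPEC =====
def Spec_pick_cards_for_ranks (cards : List (String × String)) (ranks_needed : List String) (flush_suit : Option String) (out : List (String × String)) : Prop := out = pick_cards_for_ranks_alt cards ranks_needed flush_suit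
instance (cards : List (String × String)) (ranks_needed : List String) (flush_suit : Option String) (out : List (String × String)) : Decidable (Spec_pick_cards_for_ranks cards ranks_needed flush_suit out) := by unfold Spec_pick_cards_for_ranks; infer_instance

-- ===== CLAIM (what is proved, stated in full; the proofs are below) =====
def Claim_equal_pick_cards_for_ranks : Prop := ∀ (cards : List (String × String)) (ranks_needed : List String) (flush_suit : Option String), Dom_pick_cards_for_ranks cards ranks_needed flush_suit → Spec_pick_cards_for_ranks cards ranks_needed flush_suit (pick_cards_for_ranks cards ranks_needed flush_suit)

-- ===== LEMMAS AND PROOFS =====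

-- the matching predicate, as a Bool
def pvPred (flush_suit : Option String) (r : String) (c : String × String) : Bool :=
  (c.1 == r) && pvSuitOk flush_suit c

theorem pvPred_iff (flush_suit : Option String) (r : String) (c : String × String) :
    pvPred flush_suit r c = true ↔ (c.1 = r ∧ (flush_suit = none ∨ some c.2 = flush_suit)) := by
  cases flush_suit <;> simp [pvPred, pvSuitOk] <;> tauto

theorem pvFindMatch_eq_head_filter (remaining : List (String × String)) (r : String) (flush_suit : Option String) :
    pvFindMatch remaining r flush_suit = (remaining.filter (pvPred flush_suit r)).head? := by
  induction remaining with
  | nil => rfl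
  | cons c t ih =>
    by_cases h : c.1 = r ∧ (flush_suit = none ∨ some c.2 = flush_suit)
    · simp [pvFindMatch, h, List.filter_cons, (pvPred_iff flush_suit r c).mpr h]
    · have hp : pvPred flush_suit r c = false := by
        rw [Bool.eq_false_iff]
        intro hc; exact h ((pvPred_iff flush_suit r c).mp hc)
      simp [pvFindMatch, h, List.filter_cons, hp, ih]

-- the found card satisfies the predicate
theorem pvFindMatch_pred {remaining : List (String × String)} {r : String} {flush_suit : Option String} {c : String × String}
    (h : pvFindMatch remaining r flush_suit = some c) : pvPred flush_suit r c = true := by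
  induction remaining with
  | nil => simp [pvFindMatch] at h
  | cons x t ih =>
    by_cases hx : x.1 = r ∧ (flush_suit = none ∨ some x.2 = flush_suit)
    · simp [pvFindMatch, hx] at h
      subst h; exact (pvPred_iff flush_suit r x).mpr hx
    · simp [pvFindMatch, hx] at h
      exact ih h

-- removing the first match: the rank-r queue loses its head, every other queue is untouched
theorem pvRemoveFirst_filter (remaining : List (String × String)) (r : String) (flush_suit : Option String)
    (c : String × String) (h : pvFindMatch remaining r flush_suit = some c) (r' : String) :
    (pvRemoveFirst remaining c).filter (pvPred flush_suit r') =
      if r' = r then (remaining.filter (pvPred flush_suit r)).tail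
      else remaining.filter (pvPred flush_suit r') := by
  induction remaining with
  | nil => simp [pvFindMatch] at h
  | cons x t ih =>
    by_cases hx : x.1 = r ∧ (flush_suit = none ∨ some x.2 = flush_suit)
    · simp [pvFindMatch, hx] at h
      subst h
      have hpx : pvPred flush_suit r x = true := (pvPred_iff flush_suit r x).mpr hx
      by_cases hr : r' = r
      · subst hr
        simp [pvRemoveFirst, List.filter_cons, hpx]
      · have hpx' : pvPred flush_suit r' x = false := by
          rw [Bool.eq_false_iff]
          intro hc
          exact hr (hx.1 ▸ ((pvPred_iff flush_suit r' x).mp hc).1.symm)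
        simp [pvRemoveFirst, List.filter_cons, hpx', hr]
    · simp [pvFindMatch, hx] at h
      have hpc : pvPred flush_suit r c = true := pvFindMatch_pred h
      have hxc : x ≠ c := by
        intro he; subst he
        exact hx ((pvPred_iff flush_suit r x).mp hpc)
      have hpx : pvPred flush_suit r x = false := by
        rw [Bool.eq_false_iff]
        intro hc; exact hx ((pvPred_iff flush_suit r x).mp hc)
      by_cases hr : r' = r
      · subst hr
        simp [pvRemoveFirst, hxc, List.filter_cons, hpx, ih h]
      · have hrem : pvRemoveFirst (x :: t) c = x :: pvRemoveFirst t c := by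
          simp [pvRemoveFirst, hxc]
        rw [hrem, List.filter_cons, List.filter_cons, ih h]
        simp [hr, List.filter_cons]

-- the grouping pass builds exactly the suit-filtered rank queues
theorem pvBuildGroups_getD (cards : List (String × String)) (flush_suit : Option String)
    (d : PySem.Dict String (List (String × String))) (r : String) :
    (cards.foldl (fun d c => if pvSuitOk flush_suit c then d.modify c.1 [] (· ++ [c]) else d) d).getD r []
      = d.getD r [] ++ cards.filter (pvPred flush_suit r) := by
  induction cards generalizing d with
  | nil => simp
  | cons c t ih =>
    simp only [List.foldl_cons, List.filter_cons]
    by_cases hs : pvSuitOk flush_suit c = true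
    · rw [if_pos hs, ih]
      by_cases hr : c.1 = r
      · have : pvPred flush_suit r c = true := by simp [pvPred, hr, hs]
        rw [this]
        simp [PySem.Dict.getD_modify, hr]
      · have : pvPred flush_suit r c = false := by simp [pvPred]; intro h; exact absurd h hr
        rw [this]
        simp [PySem.Dict.getD_modify, hr, Ne.symm hr]
    · have hs' : pvSuitOk flush_suit c = false := by revert hs; cases pvSuitOk flush_suit c <;> simp
      have : pvPred flush_suit r c = false := by simp [pvPred, hs']
      rw [if_neg (by simp [hs']), this, ih]
      simp

-- main loop invariant: if every rank queue equals the filtered remaining list,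
-- the two loops produce the same picks
theorem pvLoop_eq (ranks : List String) (flush_suit : Option String) :
    ∀ (remaining : List (String × String)) (groups : PySem.Dict String (List (String × String))),
    (∀ r, groups.getD r [] = remaining.filter (pvPred flush_suit r)) →
    ∀ picked, pvPickLoop ranks picked remaining flush_suit = pvPickFromGroups ranks groups picked := by
  induction ranks with
  | nil => intro _ _ _ _; rfl
  | cons r rs ih =>
    intro remaining groups hinv picked
    have hfind := pvFindMatch_eq_head_filter remaining r flush_suit
    rw [← hinv r] at hfind
    cases hg : groups.get? r with
    | none =>
      have hq : groups.getD r [] = [] := by rw [PySem.Dict.getD_eq_get?_getD, hg]; rfl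
      rw [hq] at hfind
      simp only [pvPickLoop, hfind, pvPickFromGroups, hg]
      exact ih remaining groups hinv picked
    | some v =>
      have hq : groups.getD r [] = v := by rw [PySem.Dict.getD_eq_get?_getD, hg]; rfl
      cases v with
      | nil =>
        rw [hq] at hfind
        simp only [pvPickLoop, hfind, pvPickFromGroups, hg]
        exact ih remaining groups hinv picked
      | cons c t =>
        rw [hq] at hfind
        simp only [List.head?_cons] at hfind
        simp only [pvPickLoop, hfind, pvPickFromGroups, hg]
        apply ih
        intro r'
        rw [PySem.Dict.getD_insert,
            pvRemoveFirst_filter remaining r flush_suit c hfind r']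
        by_cases hr : r' = r
        · simp [hr, ← hinv r, hq]
        · simp [hr, hinv r']

-- ===== VERDICT (by name: the statement is the Claim_ definition above) =====
theorem pick_cards_for_ranks_spec : Claim_equal_pick_cards_for_ranks := by
  intro cards ranks_needed flush_suit _
  unfold Spec_pick_cards_for_ranks pick_cards_for_ranks pick_cards_for_ranks_alt pvBuildGroups
  exact pvLoop_eq ranks_needed flush_suit cards _
    (fun r => by rw [pvBuildGroups_getD]; simp) []
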